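-- pv_equiv track=rewrite | github.com/ONEGAYI/sentaurus-syntax-highlight | scripts/split_long_matches.py | find_top_level_group
-- ===== SOURCE A (Python) =====
-- def find_top_level_group(match_str):
--     """定位 match 字符串中最外层的括号组。
--
--     返回 (prefix, inner_content, suffix) 或 None。
--     prefix 包含 ( 及其之前的内容，suffix 包含 ) 及其之后的内容。
--     inner_content 是括号内的纯替代项文本（不含外层括号）。
--     """
--     i = 0
--     first_open = -1
--     depth = 0
--     has_pipe = False
--
--     while i < len(match_str):
--         ch = match_str[i]
--         # 跳过转义字符对
--         if ch == '\\' and i + 1 < len(match_str):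
--             i += 2
--             continue
--         if ch == '[' and depth == 0:
--             # 跳过字符类 [...]，内部 | 无特殊含义
--             i += 1
--             while i < len(match_str):
--                 if match_str[i] == '\\' and i + 1 < len(match_str):
--                     i += 2
--                     continue
--                 if match_str[i] == ']':
--                     break
--                 i += 1
--             i += 1
--             continue
--         if ch == '(':
--             if first_open == -1:
--                 first_open = i
--             depth += 1
--         elif ch == ')':
--             depth -= 1
--             if depth == 0 and first_open != -1:
--                 prefix = match_str[:first_open + 1]   # 包含 (
--                 inner = match_str[first_open + 1:i]
--                 suffix = match_str[i:]                  # 包含 )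
--                 return prefix, inner, suffix
--         elif ch == '|' and depth >= 1 and first_open != -1:
--             has_pipe = True
--         i += 1
--
--     return None
-- ===== SOURCE B (Python) =====
-- def find_top_level_group(match_str):
--     """定位 match 字符串中最外层的括号组。
--
--     返回 (prefix, inner_content, suffix) 或 None。
--     """
--     # Pass 1: strip escape pairs, keeping (index, char) of the remaining chars.
--     n = len(match_str)
--     tokens = []
--     i = 0
--     while i < n:
--         if match_str[i] == '\\' and i + 1 < n:
--             i += 2
--         else:
--             tokens.append((i, match_str[i]))
--             i += 1
--     # Pass 2: a three-field state machine over the token stream.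
--     in_class = False
--     first_open = None
--     depth = 0
--     for idx, ch in tokens:
--         if in_class:
--             if ch == ']':
--                 in_class = False
--         elif ch == '[' and depth == 0:
--             in_class = True
--         elif ch == '(':
--             if first_open is None:
--                 first_open = idx
--             depth += 1
--         elif ch == ')':
--             depth -= 1
--             if depth == 0 and first_open is not None:
--                 return (match_str[:first_open + 1],
--                         match_str[first_open + 1:idx],
--                         match_str[idx:])
--     return None
-- ===== Notes on version B (the rewrite author's own statement) =====
-- stated objective: alternative
-- what changed: A is one index-jumping while loop with a nested character-class scanning loop and a dead has_pipe flag; B first strips escape pairs into an (index,char) token list and then runs a flat three-field state machine (in_class/first_open/depth) over it, with no nested loop and no index jumps.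
import Mathlib
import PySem

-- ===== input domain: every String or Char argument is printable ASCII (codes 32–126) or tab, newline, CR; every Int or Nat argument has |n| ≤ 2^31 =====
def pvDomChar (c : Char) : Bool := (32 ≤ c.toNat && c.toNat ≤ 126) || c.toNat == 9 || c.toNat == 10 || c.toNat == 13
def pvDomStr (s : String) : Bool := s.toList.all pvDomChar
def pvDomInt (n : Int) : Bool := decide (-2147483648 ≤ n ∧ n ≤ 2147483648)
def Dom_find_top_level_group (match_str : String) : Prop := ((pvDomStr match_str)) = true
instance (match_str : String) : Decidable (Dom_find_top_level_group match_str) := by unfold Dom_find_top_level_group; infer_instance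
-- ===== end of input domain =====

-- A: single index-jumping scan with a nested char-class loop; B: strip escape pairs into tokens,
-- then a flat three-field state machine. Proved to return the same value on every string.


-- ===== PORT A =====
-- inner 'while' of A: from index i, skip escape pairs until ']' or end; returns the index where the loop stops
def pvAinner (cs : List Char) (i : Nat) : Nat :=
  if h : i < cs.length then
    if cs[i] = '\\' ∧ i + 1 < cs.length then pvAinner cs (i + 2)
    else if cs[i] = ']' then i
    else pvAinner cs (i + 1)
  else i
termination_by cs.length - i

theorem pvAinner_ge (cs : List Char) (i : Nat) : i ≤ pvAinner cs i := by
  unfold pvAinner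
  split_ifs with h h1 h2
  · exact le_trans (by omega) (pvAinner_ge cs (i + 2))
  · exact le_refl i
  · exact le_trans (by omega) (pvAinner_ge cs (i + 1))
  · exact le_refl i
termination_by cs.length - i

-- outer 'while' of A: state (i, first_open, depth, has_pipe); returns the triple at depth 1→0
def pvAloop (cs : List Char) (i : Nat) (first depth : Int) (hasPipe : Bool) :
    Option (String × String × String) :=
  if h : i < cs.length then
    let ch := cs[i]
    if ch = '\\' ∧ i + 1 < cs.length then pvAloop cs (i + 2) first depth hasPipe
    else if ch = '[' ∧ depth = 0 then pvAloop cs (pvAinner cs (i + 1) + 1) first depth hasPipe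
    else if ch = '(' then
      pvAloop cs (i + 1) (if first = -1 then (i : Int) else first) (depth + 1) hasPipe
    else if ch = ')' then
      if depth - 1 = 0 ∧ first ≠ -1 then
        some (String.ofList (PySem.List.slice cs none (some (first + 1))),
              String.ofList (PySem.List.slice cs (some (first + 1)) (some (i : Int))),
              String.ofList (PySem.List.slice cs (some (i : Int)) none))
      else pvAloop cs (i + 1) first (depth - 1) hasPipe
    else if ch = '|' ∧ depth ≥ 1 ∧ first ≠ -1 then pvAloop cs (i + 1) first depth true
    else pvAloop cs (i + 1) first depth hasPipe
  else none
termination_by cs.length - i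
decreasing_by
  · omega
  · have := pvAinner_ge cs (i + 1); omega
  all_goals omega

def find_top_level_group (match_str : String) : Option (String × String × String) :=
  pvAloop match_str.toList 0 (-1) 0 false

-- ===== PORT B =====
-- pass 1 of B: strip escape pairs, keep (index, char) of the remaining characters
def pvBtokens (cs : List Char) (i : Nat) : List (Nat × Char) :=
  if h : i < cs.length then
    if cs[i] = '\\' ∧ i + 1 < cs.length then pvBtokens cs (i + 2)
    else (i, cs[i]) :: pvBtokens cs (i + 1)
  else []
termination_by cs.length - i

-- pass 2 of B: three-field state machine (in_class, first_open, depth) over the token list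
def pvBrun (cs : List Char) : List (Nat × Char) → Bool → Option Nat → Int →
    Option (String × String × String)
  | [], _, _, _ => none
  | (idx, ch) :: rest, inClass, first, depth =>
    if inClass then
      pvBrun cs rest (if ch = ']' then false else true) first depth
    else if ch = '[' ∧ depth = 0 then
      pvBrun cs rest true first depth
    else if ch = '(' then
      pvBrun cs rest false (some (first.getD idx)) (depth + 1)
    else if ch = ')' then
      if depth - 1 = 0 ∧ first.isSome then
        match first with
        | some k =>
          some (String.ofList (cs.take (k + 1)),
                String.ofList ((cs.drop (k + 1)).take (idx - (k + 1))),
                String.ofList (cs.drop idx))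
        | none => none
      else pvBrun cs rest false first (depth - 1)
    else
      pvBrun cs rest false first depth

def find_top_level_group_alt (match_str : String) : Option (String × String × String) :=
  pvBrun match_str.toList (pvBtokens match_str.toList 0) false none 0

-- ===== PRECONDITION & SPEC =====
def Spec_find_top_level_group (match_str : String) (out : Option (String × String × String)) : Prop := out = find_top_level_group_alt match_str
instance (match_str : String) (out : Option (String × String × String)) : Decidable (Spec_find_top_level_group match_str out) := by unfold Spec_find_top_level_group; infer_instance

-- ===== CLAIM (what is proved, stated in full; the proofs are below) =====
def Claim_equal_find_top_level_group : Prop := ∀ (match_str : String), Dom_find_top_level_group match_str → Spec_find_top_level_group match_str (find_top_level_group match_str)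

-- ===== LEMMAS AND PROOFS =====

-- relation between A's Int sentinel first_open and B's Option Nat
def pvFirstRel (fA : Int) (fB : Option Nat) : Prop :=
  (fA = -1 ∧ fB = none) ∨ (∃ k : Nat, fA = (k : Int) ∧ fB = some k)

-- one-step unfolding lemmas for the token pass
theorem pvBtokens_end (cs : List Char) (i : Nat) (h : ¬ i < cs.length) :
    pvBtokens cs i = [] := by
  rw [pvBtokens.eq_def, dif_neg h]

theorem pvBtokens_esc (cs : List Char) (i : Nat) (h : i < cs.length)
    (he : cs[i] = '\\' ∧ i + 1 < cs.length) : pvBtokens cs i = pvBtokens cs (i + 2) := by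
  rw [pvBtokens.eq_def, dif_pos h, if_pos he]

theorem pvBtokens_cons (cs : List Char) (i : Nat) (h : i < cs.length)
    (he : ¬ (cs[i] = '\\' ∧ i + 1 < cs.length)) :
    pvBtokens cs i = (i, cs[i]) :: pvBtokens cs (i + 1) := by
  rw [pvBtokens.eq_def, dif_pos h, if_neg he]

-- while B is inside a character class, it consumes exactly the tokens A's inner loop skips
theorem pvB_class_skip (cs : List Char) (j : Nat) (first : Option Nat) (depth : Int) :
    pvBrun cs (pvBtokens cs j) true first depth
      = pvBrun cs (pvBtokens cs (pvAinner cs j + 1)) false first depth := by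
  by_cases h : j < cs.length
  · by_cases hesc : cs[j] = '\\' ∧ j + 1 < cs.length
    · rw [pvAinner.eq_def, dif_pos h, if_pos hesc, pvBtokens_esc cs j h hesc]
      exact pvB_class_skip cs (j + 2) first depth
    · by_cases hrb : cs[j] = ']'
      · rw [pvAinner.eq_def, dif_pos h, if_neg hesc, if_pos hrb,
          pvBtokens_cons cs j h hesc]
        simp [pvBrun, hrb]
      · rw [pvAinner.eq_def, dif_pos h, if_neg hesc, if_neg hrb,
          pvBtokens_cons cs j h hesc]
        simp only [pvBrun, if_neg hrb]
        exact pvB_class_skip cs (j + 1) first depth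
  · rw [pvAinner.eq_def, dif_neg h, pvBtokens_end cs j h,
      pvBtokens_end cs (j + 1) (by omega)]
    rfl
termination_by cs.length - j
decreasing_by all_goals omega

-- main invariant: A's loop from index i equals B's state machine on the tokens from i
theorem pvMain (cs : List Char) (i : Nat) (fA : Int) (fB : Option Nat) (depth : Int)
    (hp : Bool) (hrel : pvFirstRel fA fB) :
    pvAloop cs i fA depth hp = pvBrun cs (pvBtokens cs i) false fB depth := by
  by_cases h : i < cs.length
  case neg =>
    rw [pvAloop.eq_def, dif_neg h, pvBtokens_end cs i h]
    rfl
  case pos =>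
  by_cases hesc : cs[i] = '\\' ∧ i + 1 < cs.length
  · rw [pvAloop.eq_def, dif_pos h, if_pos hesc, pvBtokens_esc cs i h hesc]
    exact pvMain cs (i + 2) fA fB depth hp hrel
  rw [pvAloop.eq_def, dif_pos h, pvBtokens_cons cs i h hesc]
  simp only [if_neg hesc]
  by_cases hclass : cs[i] = '[' ∧ depth = 0
  · -- '[' at depth 0: A jumps past the class, B enters the in_class state
    rw [if_pos hclass]
    simp only [pvBrun, Bool.false_eq_true, if_false, if_pos hclass]
    rw [pvB_class_skip]
    exact pvMain cs (pvAinner cs (i + 1) + 1) fA fB depth hp hrel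
  rw [if_neg hclass]
  simp only [pvBrun, Bool.false_eq_true, if_false, if_neg hclass]
  by_cases hopen : cs[i] = '('
  · -- '('
    rw [if_pos hopen, if_pos hopen]
    rcases hrel with ⟨h1, h2⟩ | ⟨k, h1, h2⟩
    · subst h2; rw [if_pos h1]
      exact pvMain cs (i + 1) (i : Int) (some i) (depth + 1) hp (Or.inr ⟨i, rfl, rfl⟩)
    · subst h2; rw [if_neg (by omega)]
      exact pvMain cs (i + 1) fA (some k) (depth + 1) hp (Or.inr ⟨k, h1, rfl⟩)
  rw [if_neg hopen, if_neg hopen]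
  by_cases hclose : cs[i] = ')'
  · rw [if_pos hclose, if_pos hclose]
    by_cases hret : depth - 1 = 0 ∧ fA ≠ -1
    · -- ')', returning
      obtain ⟨hd, hfa⟩ := hret
      rcases hrel with ⟨h1, _⟩ | ⟨k, h1, h2⟩
      · exact absurd h1 hfa
      · subst h2
        rw [if_pos ⟨hd, hfa⟩, if_pos (⟨hd, rfl⟩ : depth - 1 = 0 ∧ (some k).isSome = true)]
        subst h1
        have e1 : (k : Int) + 1 = ((k + 1 : Nat) : Int) := by push_cast; ring
        rw [e1, PySem.List.slice_to_natCast, PySem.List.slice_natCast,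
          PySem.List.slice_from_natCast]
    · -- ')', not returning
      rw [if_neg hret]
      rcases hrel with ⟨h1, h2⟩ | ⟨k, h1, h2⟩
      · subst h2
        rw [if_neg (by simp)]
        exact pvMain cs (i + 1) fA none (depth - 1) hp (Or.inl ⟨h1, rfl⟩)
      · subst h2
        have hnd : ¬ (depth - 1 = 0 ∧ (some k).isSome = true) := by
          intro ⟨hd, _⟩; exact hret ⟨hd, by subst h1; simp⟩
        rw [if_neg hnd]
        exact pvMain cs (i + 1) fA (some k) (depth - 1) hp (Or.inr ⟨k, h1, rfl⟩)
  rw [if_neg hclose, if_neg hclose]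
  by_cases hpipe : cs[i] = '|' ∧ depth ≥ 1 ∧ fA ≠ -1
  · rw [if_pos hpipe]
    exact pvMain cs (i + 1) fA fB depth true hrel
  · rw [if_neg hpipe]
    exact pvMain cs (i + 1) fA fB depth hp hrel
termination_by cs.length - i
decreasing_by
  all_goals first
    | omega
    | (have := pvAinner_ge cs (i + 1); omega)

-- ===== VERDICT (by name: the statement is the Claim_ definition above) =====
theorem find_top_level_group_spec : Claim_equal_find_top_level_group := by
  intro s _
  unfold Spec_find_top_level_group find_top_level_group find_top_level_group_alt
  exact pvMain s.toList 0 (-1) none 0 false (Or.inl ⟨rfl, rfl⟩)
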